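-- pv_equiv track=rewrite | github.com/jonasKarasek/tests | sum_array.py | func
-- ===== SOURCE A (Python) =====
-- def func(array: list, target_sum: int):
--     output = []
--
--     if(len(array) < 2):
--         return output
--
--     for value1 in array:
--         for value2 in array:
--             if target_sum == value1 + value2 and value1 != value2:
--                 output = [value1, value2]
--
--     return output
--
-- list = [3, 5, -4, 8, 11, 1, -1, 6]
-- ===== SOURCE B (Python) =====
-- def func(array: list, target_sum: int):
--     values = set(array)
--     for value1 in reversed(array):
--         value2 = target_sum - value1
--         if value2 != value1 and value2 in values:
--             return [value1, value2]
--     return []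
-- ===== Notes on version B (the rewrite author's own statement) =====
-- stated objective: faster
-- what changed: Replaced A's O(n^2) double loop (last matching pair wins) by a set of values built once plus a single backwards scan returning the first element whose distinct complement is present.
import Mathlib
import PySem

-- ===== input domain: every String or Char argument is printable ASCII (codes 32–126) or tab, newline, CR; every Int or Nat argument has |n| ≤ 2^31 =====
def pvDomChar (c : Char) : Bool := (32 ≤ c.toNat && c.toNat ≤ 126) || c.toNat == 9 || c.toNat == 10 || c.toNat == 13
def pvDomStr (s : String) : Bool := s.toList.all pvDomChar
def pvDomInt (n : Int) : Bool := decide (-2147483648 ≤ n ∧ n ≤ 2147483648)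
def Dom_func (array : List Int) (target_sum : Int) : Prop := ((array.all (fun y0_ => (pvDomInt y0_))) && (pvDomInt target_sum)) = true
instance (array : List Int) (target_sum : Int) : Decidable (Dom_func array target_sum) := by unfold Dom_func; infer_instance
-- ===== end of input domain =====

-- B replaces A's O(n^2) double loop by a single backwards scan with a set of values (alternative/faster); return values agree everywhere.

-- ===== PORT A =====
-- literal transliteration of A: output accumulator overwritten by every matching (value1, value2) pair
def func (array : List Int) (target_sum : Int) : List Int :=
  if array.length < 2 then []
  else
    array.foldl (fun output value1 =>
      array.foldl (fun output value2 =>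
        if target_sum == value1 + value2 && value1 != value2 then [value1, value2] else output)
        output) []

-- ===== PORT B =====
-- the 'for value1 in reversed(array): … return' loop of Source B
def funcAltGo (values : PySem.Set Int) (target_sum : Int) : List Int → List Int
  | [] => []
  | value1 :: rest =>
    let value2 := target_sum - value1
    if value2 != value1 && PySem.Set.contains values value2 then [value1, value2]
    else funcAltGo values target_sum rest

def func_alt (array : List Int) (target_sum : Int) : List Int :=
  funcAltGo (PySem.Set.ofList array) target_sum array.reverse

-- ===== PRECONDITION & SPEC =====
def Spec_func (array : List Int) (target_sum : Int) (out : List Int) : Prop := out = func_alt array target_sum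
instance (array : List Int) (target_sum : Int) (out : List Int) : Decidable (Spec_func array target_sum out) := by unfold Spec_func; infer_instance

-- ===== CLAIM (what is proved, stated in full; the proofs are below) =====
def Claim_equal_func : Prop := ∀ (array : List Int) (target_sum : Int), Dom_func array target_sum → Spec_func array target_sum (func array target_sum)

-- ===== LEMMAS AND PROOFS =====

-- A's inner loop over l: last matching value2 wins; any match writes [v1, t - v1]
lemma inner_loop (t v1 : Int) (l : List Int) (out : List Int) :
    l.foldl (fun output value2 =>
        if t == v1 + value2 && v1 != value2 then [v1, value2] else output) out
      = if (t - v1) ∈ l ∧ t - v1 ≠ v1 then [v1, t - v1] else out := by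
  induction l generalizing out with
  | nil => simp
  | cons v2 rest ih =>
    simp only [List.foldl_cons, ih, List.mem_cons]
    rcases eq_or_ne (t - v1) v1 with hne | hne
    · have hc : (t == v1 + v2 && v1 != v2) = false := by
        rcases eq_or_ne t (v1 + v2) with h1 | h1
        · have h2 : v1 = v2 := by omega
          simp [h2]
        · simp [h1]
      simp [hc, hne]
    · rcases eq_or_ne (t - v1) v2 with hv | hv
      · have hc : (t == v1 + v2 && v1 != v2) = true := by
          have h1 : t = v1 + v2 := by omega
          have h2 : v1 ≠ v2 := by omega
          simp [h1, h2, bne]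
        by_cases hr : (t - v1) ∈ rest
        · simp [hc, hv]
          intro h
          exact absurd (hv.trans h) hne
        · rw [if_neg (fun h => hr h.1), if_pos hc, if_pos ⟨Or.inl hv, hne⟩, hv]
      · have hc : (t == v1 + v2 && v1 != v2) = false := by
          have h1 : t ≠ v1 + v2 := by omega
          simp [h1]
        by_cases hr : (t - v1) ∈ rest <;> simp [hc, hr, hne, hv]

-- B's loop condition agrees with A's simplified per-element condition
lemma go_cons (s : PySem.Set Int) (t v : Int) (l : List Int) :
    funcAltGo s t (v :: l)
      = if (t - v) != v && PySem.Set.contains s (t - v) then [v, t - v]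
        else funcAltGo s t l := rfl

-- outer loop of A (after inner_loop) versus B's backwards scan
lemma outer_loop (a : List Int) (t : Int) (l : List Int) (out : List Int) :
    l.foldl (fun output v1 =>
        if (t - v1) ∈ a ∧ t - v1 ≠ v1 then [v1, t - v1] else output) out
      = (if funcAltGo (PySem.Set.ofList a) t l.reverse = [] then out
         else funcAltGo (PySem.Set.ofList a) t l.reverse) := by
  induction l using List.reverseRecOn generalizing out with
  | nil => simp [funcAltGo]
  | append_singleton l' v ih =>
    rw [List.foldl_append]
    simp only [List.reverse_append, List.reverse_singleton, List.singleton_append, go_cons,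
      List.foldl_cons, List.foldl_nil]
    by_cases hq : (t - v) ∈ a ∧ t - v ≠ v
    · have hc : ((t - v) != v && PySem.Set.contains (PySem.Set.ofList a) (t - v)) = true := by
        simp only [Bool.and_eq_true, bne_iff_ne, PySem.Set.contains_iff, PySem.Set.mem_ofList]
        exact ⟨hq.2, hq.1⟩
      simp [hq]
    · have hc : ((t - v) != v && PySem.Set.contains (PySem.Set.ofList a) (t - v)) = false := by
        by_cases hne : t - v = v
        · simp [hne]
        · have hm : (t - v) ∉ a := fun hm => hq ⟨hm, hne⟩
          have hcn : PySem.Set.contains (PySem.Set.ofList a) (t - v) = false := by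
            rw [← Bool.not_eq_true, PySem.Set.contains_iff, PySem.Set.mem_ofList]
            exact hm
          rw [hcn, Bool.and_false]
      simp only [hc, Bool.false_eq_true, if_false, if_neg hq]
      exact ih out

-- small arrays: B finds nothing either
lemma go_small (a : List Int) (t : Int) (h : a.length < 2) :
    funcAltGo (PySem.Set.ofList a) t a.reverse = [] := by
  match a, h with
  | [], _ => rfl
  | [x], _ =>
    show funcAltGo (PySem.Set.ofList [x]) t [x] = []
    by_cases hne : t - x = x
    · simp [hne, funcAltGo]
    · have hm : PySem.Set.contains (PySem.Set.ofList [x]) (t - x) = false := by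
        rw [← Bool.not_eq_true, PySem.Set.contains_iff, PySem.Set.mem_ofList]
        simp [hne]
      simp [funcAltGo]

-- ===== VERDICT (by name: the statement is the Claim_ definition above) =====
theorem func_spec : Claim_equal_func := by
  intro array target_sum _
  unfold Spec_func func func_alt
  by_cases h : array.length < 2
  · simp [h, go_small array target_sum h]
  · simp only [h, if_false]
    have hinner : (fun (output : List Int) (value1 : Int) =>
        array.foldl (fun output value2 =>
          if target_sum == value1 + value2 && value1 != value2 then [value1, value2] else output)
          output)
      = (fun (output : List Int) (value1 : Int) =>
          if (target_sum - value1) ∈ array ∧ target_sum - value1 ≠ value1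
          then [value1, target_sum - value1] else output) := by
      funext o v1; exact inner_loop target_sum v1 array o
    rw [hinner, outer_loop array target_sum array []]
    split <;> simp_all
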